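-- pv_equiv track=rewrite | github.com/queelius/computational-explorations | src/kelley_meka_schur.py | schur_count_direct
-- ===== SOURCE A (Python) =====
-- from typing import List, Set, Tuple, Optional
--
-- def schur_count_direct(A: Set[int], N: int) -> int:
--     """Count Schur triples (a + b = c with a, b, c in A) directly."""
--     A_set = set(a % N for a in A)
--     count = 0
--     for a in A_set:
--         for b in A_set:
--             if (a + b) % N in A_set:
--                 count += 1
--     return count
-- ===== SOURCE B (Python) =====
-- def schur_count_direct(A, N):
--     """Count Schur triples (a + b = c with a, b, c in A) directly."""
--     residues = sorted(set(a % N for a in A))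
--     sums = {}
--     for a in residues:
--         for b in residues:
--             k = (a + b) % N
--             sums[k] = sums.get(k, 0) + 1
--     count = 0
--     for c in residues:
--         count += sums.get(c, 0)
--     return count
-- ===== Notes on version B (the rewrite author's own statement) =====
-- stated objective: alternative
-- what changed: B sorts the distinct residues once, builds a histogram (dict) of all pairwise sums mod N in one quadratic pass, and obtains the count by summing the histogram over the residue set in a final linear pass, instead of A's membership test inside the inner loop.
import Mathlib
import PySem

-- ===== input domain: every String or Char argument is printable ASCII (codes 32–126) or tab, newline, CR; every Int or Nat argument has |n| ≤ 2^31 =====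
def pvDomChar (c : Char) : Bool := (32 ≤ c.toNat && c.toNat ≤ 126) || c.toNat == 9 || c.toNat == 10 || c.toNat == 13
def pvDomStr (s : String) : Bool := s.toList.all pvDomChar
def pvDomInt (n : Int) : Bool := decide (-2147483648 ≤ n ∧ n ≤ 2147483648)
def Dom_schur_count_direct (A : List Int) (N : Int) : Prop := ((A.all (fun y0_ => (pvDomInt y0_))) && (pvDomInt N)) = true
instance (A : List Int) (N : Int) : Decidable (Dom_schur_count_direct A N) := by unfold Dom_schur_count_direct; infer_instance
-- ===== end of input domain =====

-- B replaces the membership test inside A's quadratic loop by a histogram (dict) of all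
-- pairwise sums mod N over the sorted residues, summed over the residue set in a final pass
-- (objective: alternative decomposition; not measured faster).

-- ===== PORT A =====
def schur_count_direct (A : List Int) (N : Int) : Int :=
  let Aset : PySem.Set Int := PySem.Set.ofList (A.map (fun a => PySem.Int.mod a N))
  Aset.foldl (fun count a =>
    Aset.foldl (fun count b =>
      if Aset.contains (PySem.Int.mod (a + b) N) then count + 1 else count) count) 0

-- ===== PORT B =====
def schur_count_direct_alt (A : List Int) (N : Int) : Int :=
  let residues := PySem.List.sorted (PySem.Set.ofList (A.map (fun a => PySem.Int.mod a N))) (fun x => x) false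
  let sums : PySem.Dict Int Int := residues.foldl (fun d a =>
    residues.foldl (fun d b =>
      let k := PySem.Int.mod (a + b) N
      d.insert k (d.getD k 0 + 1)) d) PySem.Dict.empty
  residues.foldl (fun count c => count + sums.getD c 0) 0

-- ===== PRECONDITION & SPEC =====
-- Pre_ excludes only N = 0, where Python's '%' raises ZeroDivisionError in both programs.
def Pre_schur_count_direct (A : List Int) (N : Int) : Prop := N ≠ 0
instance (A : List Int) (N : Int) : Decidable (Pre_schur_count_direct A N) := by unfold Pre_schur_count_direct; infer_instance
def pvWitness_schur_count_direct : List Int × Int := ([1, 2, 4], 7)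

def Spec_schur_count_direct (A : List Int) (N : Int) (out : Int) : Prop := out = schur_count_direct_alt A N
instance (A : List Int) (N : Int) (out : Int) : Decidable (Spec_schur_count_direct A N out) := by unfold Spec_schur_count_direct; infer_instance

-- ===== CLAIM (what is proved, stated in full; the proofs are below) =====
def Claim_equal_schur_count_direct : Prop := ∀ (A : List Int) (N : Int), Dom_schur_count_direct A N → Pre_schur_count_direct A N → Spec_schur_count_direct A N (schur_count_direct A N)

-- ===== LEMMAS AND PROOFS =====

-- the multiset of all pairwise sums mod N over a list of residues
def pvPairKeys (L : List Int) (N : Int) : List Int :=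
  L.flatMap (fun a => L.map (fun b => PySem.Int.mod (a + b) N))

-- summing an Int-cast countP of the inner lists over the outer list is a countP of the flatMap
theorem pv_sum_countP_flatMap (l : List Int) (s : Int → List Int) (p : Int → Bool) :
    (l.map (fun a => ((s a).countP p : Int))).sum = (((l.flatMap s).countP p : Int)) := by
  induction l with
  | nil => simp
  | cons a t ih => simp [List.countP_append, ih.symm]

-- A's nested counting loop counts the members of pvPairKeys that land back in the residue set
theorem pv_a_eq_countP (A : List Int) (N : Int) :
    schur_count_direct A N =
      ((pvPairKeys (PySem.Set.ofList (A.map (fun a => PySem.Int.mod a N))) N).countP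
        (fun k => (PySem.Set.ofList (A.map (fun a => PySem.Int.mod a N))).contains k) : Int) := by
  unfold schur_count_direct pvPairKeys
  simp only [PySem.List.foldl_if_add_one]
  rw [PySem.List.foldl_add (g := fun a => ((PySem.Set.ofList (A.map (fun a => PySem.Int.mod a N))).countP
      (fun b => (PySem.Set.ofList (A.map (fun a => PySem.Int.mod a N))).contains (PySem.Int.mod (a + b) N)) : Int))]
  rw [zero_add]
  rw [← pv_sum_countP_flatMap]
  congr 1
  apply List.map_congr_left
  intro a _
  rw [List.countP_map]
  rfl

-- the counter dict built by B's nested loop holds, at each key, its multiplicity among pairwise sums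
theorem pv_counter_getD (R : List Int) (N : Int) (c : Int) :
    (R.foldl (fun d a => R.foldl (fun d b =>
        d.insert (PySem.Int.mod (a + b) N) (d.getD (PySem.Int.mod (a + b) N) 0 + 1)) d)
        (PySem.Dict.empty : PySem.Dict Int Int)).getD c 0
      = ((pvPairKeys R N).count c : Int) := by
  have h1 : ∀ (a : Int) (d : PySem.Dict Int Int),
      R.foldl (fun d b => d.insert (PySem.Int.mod (a + b) N) (d.getD (PySem.Int.mod (a + b) N) 0 + 1)) d
        = (R.map (fun b => PySem.Int.mod (a + b) N)).foldl (fun d k => d.insert k (d.getD k 0 + 1)) d := by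
    intro a d; rw [List.foldl_map]
  simp only [h1]
  rw [← List.foldl_flatMap]
  rw [PySem.Dict.getD_foldl_insert_add_one]
  simp [PySem.Dict.getD, PySem.Dict.empty, PySem.Dict.get?, pvPairKeys]

-- B equals the sum, over the sorted residues, of the multiplicity of each residue among pairwise sums
theorem pv_b_eq_sum_count (A : List Int) (N : Int) :
    schur_count_direct_alt A N =
      ((PySem.List.sorted (PySem.Set.ofList (A.map (fun a => PySem.Int.mod a N))) (fun x => x) false).map
        (fun c => ((pvPairKeys (PySem.List.sorted (PySem.Set.ofList (A.map (fun a => PySem.Int.mod a N))) (fun x => x) false) N).count c : Int))).sum := by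
  unfold schur_count_direct_alt
  simp only []
  rw [PySem.List.foldl_add]
  rw [zero_add]
  congr 1
  apply List.map_congr_left
  intro c _
  exact pv_counter_getD _ N c

-- summing multiplicities over a duplicate-free list is counting membership in it
theorem pv_sum_count_nodup (R K : List Int) (h : R.Nodup) :
    (R.map (fun c => (K.count c : Int))).sum = ((K.countP (fun k => decide (k ∈ R)) : Int)) := by
  induction K with
  | nil => simp
  | cons k K' ih =>
    have hc : ∀ c : Int, ((k :: K').count c : Int) = (K'.count c : Int) + (if c == k then (1:Int) else 0) := by
      intro c; rw [List.count_cons]; split <;> simp_all <;> omega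
    simp only [hc]
    rw [PySem.List.sum_map_add_int, ih, PySem.List.sum_map_ite_one_zero]
    have hcnt : R.countP (fun c => c == k) = R.count k := rfl
    rw [hcnt, List.Nodup.count h, List.countP_cons]
    by_cases hk : k ∈ R <;> simp [hk]

-- the pairwise-sum multisets over two permuted residue lists are permutations of each other
theorem pv_keys_perm (R L : List Int) (N : Int) (h : R.Perm L) :
    (pvPairKeys R N).Perm (pvPairKeys L N) := by
  unfold pvPairKeys
  exact (List.Perm.flatMap_right _ h).trans
    (List.Perm.flatMap_left L (fun a _ => h.map (fun b => PySem.Int.mod (a + b) N)))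

-- ===== VERDICT (by name: the statement is the Claim_ definition above) =====
theorem schur_count_direct_spec : Claim_equal_schur_count_direct := by
  intro A N _ _
  unfold Spec_schur_count_direct
  set L : List Int := PySem.Set.ofList (A.map (fun a => PySem.Int.mod a N)) with hL
  set R : List Int := PySem.List.sorted L (fun x => x) false with hR
  have hperm : R.Perm L := PySem.List.sorted_perm L _ _
  have hnodupR : R.Nodup := (hperm.nodup_iff).mpr (PySem.Set.nodup_ofList _)
  rw [pv_a_eq_countP, pv_b_eq_sum_count]
  rw [← hL, ← hR]
  rw [pv_sum_count_nodup R _ hnodupR]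
  rw [((pv_keys_perm R L N hperm).countP_eq _)]
  congr 1
  apply List.countP_congr
  intro k _
  simp only [decide_eq_true_eq, PySem.Set.contains, List.contains_iff_mem]
  exact ⟨fun hk => hperm.mem_iff.mpr hk, fun hk => hperm.mem_iff.mp hk⟩
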